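-- pv_equiv track=rewrite | github.com/bschlaman/zkvoting | large_power_mod.py | get_powers
-- ===== SOURCE A (Python) =====
-- def get_powers(x):
--     powers = []
--     i = 1
--     while i <= x:
--         if i & x:
--             powers.append(i)
--         i <<= 1
--     return powers
-- ===== SOURCE B (Python) =====
-- def get_powers(x):
--     if x <= 0:
--         return []
--     rest = [2 * p for p in get_powers(x // 2)]
--     return ([1] if x % 2 else []) + rest
-- ===== Notes on version B (the rewrite author's own statement) =====
-- stated objective: alternative
-- what changed: Replaces the iterative doubling-mask scan (shifting a mask upward and testing it against a fixed x) by a recursive halving: recurse on the floor-half of x, double every element of the recursive result, and prepend a one-entry when x is odd.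
import Mathlib
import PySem

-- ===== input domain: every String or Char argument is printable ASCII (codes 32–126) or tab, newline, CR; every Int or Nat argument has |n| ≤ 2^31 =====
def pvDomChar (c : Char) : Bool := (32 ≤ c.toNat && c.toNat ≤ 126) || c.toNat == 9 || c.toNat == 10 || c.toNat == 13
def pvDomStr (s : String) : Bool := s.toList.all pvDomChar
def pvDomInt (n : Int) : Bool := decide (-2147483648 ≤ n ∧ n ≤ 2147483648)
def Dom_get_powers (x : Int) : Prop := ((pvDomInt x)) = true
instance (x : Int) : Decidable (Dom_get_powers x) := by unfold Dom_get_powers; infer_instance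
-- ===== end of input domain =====

-- ===== PORT A =====
-- B replaces the doubling-mask scan by recursion on x // 2 (alternative decomposition, same cost).
-- needed by the port's decreasing_by (Python: i <<= 1)
theorem pyShlOne (i : Int) : i <<< (1:Int) = 2 * i := by
  rw [show (1:Int) = ((1:Nat):Int) from rfl, Int.shiftLeft_natCast_right, Int.shiftLeft_eq]
  ring

-- while i <= x: if i & x: powers.append(i); i <<= 1   (the '1 ≤ i' conjunct only makes the
-- recursion total; A always starts at i = 1, where it holds and is preserved)
def get_powers_loop (x i : Int) : List Int :=
  if 1 ≤ i ∧ i ≤ x then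
    (if Int.land i x ≠ 0 then [i] else []) ++ get_powers_loop x (i <<< 1)
  else []
termination_by (x + 1 - i).toNat
decreasing_by
  rw [pyShlOne]
  omega

def get_powers (x : Int) : List Int := get_powers_loop x 1

-- ===== PORT B =====
def get_powers_alt (x : Int) : List Int :=
  if x ≤ 0 then []
  else (if PySem.Int.mod x 2 ≠ 0 then [1] else []) ++
       (get_powers_alt (PySem.Int.floordiv x 2)).map (fun p => 2 * p)
termination_by x.toNat
decreasing_by
  rw [PySem.Int.floordiv_eq_ediv_of_pos (by omega)]
  omega

-- ===== PRECONDITION & SPEC =====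
def Spec_get_powers (x : Int) (out : List Int) : Prop := out = get_powers_alt x
instance (x : Int) (out : List Int) : Decidable (Spec_get_powers x out) := by unfold Spec_get_powers; infer_instance

-- ===== CLAIM (what is proved, stated in full; the proofs are below) =====
def Claim_equal_get_powers : Prop := ∀ (x : Int), Dom_get_powers x → Spec_get_powers x (get_powers x)

-- ===== LEMMAS AND PROOFS =====

theorem loop_eq (x i : Int) : get_powers_loop x i =
    if 1 ≤ i ∧ i ≤ x then
      (if Int.land i x ≠ 0 then [i] else []) ++ get_powers_loop x (i <<< 1)
    else [] := by
  rw [get_powers_loop]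

theorem nat_land_two_mul (a b : Nat) : (2*a) &&& b = 2 * (a &&& (b/2)) := by
  apply Nat.eq_of_testBit_eq
  intro j
  cases j with
  | zero =>
    simp [Nat.testBit_zero, Nat.mul_mod_right]
  | succ j =>
    rw [Nat.testBit_and]
    rw [Nat.testBit_add_one (2*a), Nat.testBit_add_one b, Nat.testBit_add_one (2*(a &&& b/2))]
    rw [Nat.mul_div_cancel_left a (by norm_num : 0 < 2),
        Nat.mul_div_cancel_left _ (by norm_num : 0 < 2)]
    rw [Nat.testBit_and]

theorem int_land_natCast (a b : Nat) :
    Int.land (a:Int) (b:Int) = ((a &&& b : Nat) : Int) := rfl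

theorem land_two_mul_ne (a b : Int) (ha : 0 ≤ a) (hb : 0 ≤ b) :
    (Int.land (2*a) b ≠ 0) ↔ (Int.land a (b/2) ≠ 0) := by
  obtain ⟨m, rfl⟩ := Int.eq_ofNat_of_zero_le ha
  obtain ⟨n, rfl⟩ := Int.eq_ofNat_of_zero_le hb
  rw [show (2 * (m:Int)) = ((2*m : Nat) : Int) by push_cast; ring,
      show ((n:Int)/2) = ((n/2 : Nat) : Int) by omega,
      int_land_natCast, int_land_natCast, nat_land_two_mul]
  omega

theorem land_one_ne (b : Int) (hb : 0 ≤ b) :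
    (Int.land 1 b ≠ 0) ↔ (PySem.Int.mod b 2 ≠ 0) := by
  obtain ⟨n, rfl⟩ := Int.eq_ofNat_of_zero_le hb
  rw [show (1:Int) = ((1:Nat):Int) from rfl, int_land_natCast, Nat.land_comm, Nat.and_one_is_mod,
      PySem.Int.mod_eq_emod_of_pos (by norm_num)]
  omega

theorem loop_halve (n : Nat) (x i : Int) (hx : 0 ≤ x) (hi : 1 ≤ i)
    (hn : (x + 1 - 2*i).toNat = n) :
    get_powers_loop x (2*i) = (get_powers_loop (PySem.Int.floordiv x 2) i).map (fun p => 2*p) := by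
  induction n using Nat.strong_induction_on generalizing i with
  | _ n ih =>
  have hfd : PySem.Int.floordiv x 2 = x / 2 := PySem.Int.floordiv_eq_ediv_of_pos (by omega)
  by_cases hle : 2*i ≤ x
  · have hle' : i ≤ PySem.Int.floordiv x 2 := by rw [hfd]; omega
    have c1 : 1 ≤ 2*i ∧ 2*i ≤ x := ⟨by omega, hle⟩
    have c2 : 1 ≤ i ∧ i ≤ PySem.Int.floordiv x 2 := ⟨hi, hle'⟩
    rw [loop_eq x (2*i), loop_eq (PySem.Int.floordiv x 2) i,
        if_pos c1, if_pos c2, List.map_append]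
    congr 1
    · rw [hfd]
      by_cases hb : Int.land i (x/2) ≠ 0
      · rw [if_pos ((land_two_mul_ne i x (by omega) hx).mpr hb), if_pos hb]; rfl
      · rw [if_neg (fun hc => hb ((land_two_mul_ne i x (by omega) hx).mp hc)), if_neg hb]; rfl
    · rw [pyShlOne (2*i), pyShlOne i]
      exact ih (x + 1 - 2*(2*i)).toNat (by omega) (2*i) (by omega) rfl
  · rw [loop_eq x (2*i), loop_eq (PySem.Int.floordiv x 2) i,
        if_neg (by intro h; exact hle h.2),
        if_neg (by rw [hfd]; intro h; omega)]
    rfl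

theorem main_eq (n : Nat) (x : Int) (hn : x.toNat = n) :
    get_powers_loop x 1 = get_powers_alt x := by
  induction n using Nat.strong_induction_on generalizing x with
  | _ n ih =>
  by_cases hx : x ≤ 0
  · rw [loop_eq x 1, if_neg (by intro h; omega), get_powers_alt, if_pos hx]
  · have hfd : PySem.Int.floordiv x 2 = x / 2 := PySem.Int.floordiv_eq_ediv_of_pos (by omega)
    have c1 : 1 ≤ (1:Int) ∧ (1:Int) ≤ x := ⟨le_refl 1, by omega⟩
    rw [loop_eq x 1, if_pos c1, get_powers_alt, if_neg hx]
    congr 1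
    · by_cases hb : PySem.Int.mod x 2 ≠ 0
      · rw [if_pos ((land_one_ne x (by omega)).mpr hb), if_pos hb]
      · rw [if_neg (fun hc => hb ((land_one_ne x (by omega)).mp hc)), if_neg hb]
    · rw [pyShlOne 1,
          loop_halve (x + 1 - 2*1).toNat x 1 (by omega) (le_refl 1) rfl]
      congr 1
      exact ih (PySem.Int.floordiv x 2).toNat (by rw [hfd]; omega) _ rfl

-- ===== VERDICT (by name: the statement is the Claim_ definition above) =====
theorem get_powers_spec : Claim_equal_get_powers := by
  intro x _
  unfold Spec_get_powers get_powers
  exact main_eq x.toNat x rfl
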